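-- pv_equiv track=rewrite | github.com/dahlbma/cello | frontend/echo_calculator.py | _collect_dmso_sources
-- ===== SOURCE A (Python) =====
-- def _collect_dmso_sources(source_data, dmso_plate):
--     """
--     Collect all available DMSO source wells for round-robin distribution.
--
--     Args:
--         source_data: List of source plate data
--         dmso_plate: DMSO plate ID
--
--     Returns:
--         list: List of DMSO source dictionaries
--     """
--     dmso_sources = []
--
--     # First try: Look for DMSO compounds (by compound_id) from the specified DMSO plate
--     if dmso_plate:
--         dmso_sources = [src for src in source_data
--                       if src['source_plate'] == dmso_plate
--                       and src.get('compound_id', '').upper() == 'DMSO']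
--
--     # Second try: If no sources from dmso_plate, look for DMSO compound_id in any plate
--     if not dmso_sources:
--         dmso_sources = [src for src in source_data
--                       if src.get('compound_id', '').upper() == 'DMSO']
--
--     # Third try: Look for any source that might be DMSO (batch_id contains DMSO)
--     if not dmso_sources:
--         dmso_sources = [src for src in source_data
--                       if 'DMSO' in str(src.get('batch_id', '')).upper()]
--
--     return dmso_sources
-- ===== SOURCE B (Python) =====
-- def _collect_dmso_sources(source_data, dmso_plate):
--     """One pass over source_data maintaining the three fallback buckets;
--     return the first non-empty bucket (plate+compound, compound, batch)."""
--     by_plate, by_compound, by_batch = [], [], []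
--     for src in source_data:
--         if dmso_plate and src['source_plate'] == dmso_plate \
--                 and src.get('compound_id', '').upper() == 'DMSO':
--             by_plate.append(src)
--         if src.get('compound_id', '').upper() == 'DMSO':
--             by_compound.append(src)
--         if 'DMSO' in str(src.get('batch_id', '')).upper():
--             by_batch.append(src)
--     return by_plate or by_compound or by_batch
-- ===== Notes on version B (the rewrite author's own statement) =====
-- stated objective: alternative
-- what changed: Replaces A's up-to-three sequential list comprehensions over source_data with a single pass that maintains all three priority buckets and returns the first non-empty one.
import Mathlib
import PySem

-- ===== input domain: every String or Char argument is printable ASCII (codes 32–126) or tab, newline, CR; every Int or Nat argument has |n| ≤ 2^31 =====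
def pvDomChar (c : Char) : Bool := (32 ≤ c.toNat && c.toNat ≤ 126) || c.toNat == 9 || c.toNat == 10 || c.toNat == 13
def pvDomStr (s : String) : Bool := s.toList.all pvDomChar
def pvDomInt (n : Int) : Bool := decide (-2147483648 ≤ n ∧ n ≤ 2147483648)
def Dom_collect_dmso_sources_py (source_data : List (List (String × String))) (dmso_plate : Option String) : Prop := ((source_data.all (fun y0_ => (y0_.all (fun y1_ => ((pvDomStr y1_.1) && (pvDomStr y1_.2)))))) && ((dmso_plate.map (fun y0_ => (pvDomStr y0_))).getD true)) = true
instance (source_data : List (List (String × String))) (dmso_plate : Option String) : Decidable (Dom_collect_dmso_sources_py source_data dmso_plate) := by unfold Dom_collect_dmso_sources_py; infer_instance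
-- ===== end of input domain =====

-- B does the same work in one pass over source_data (three buckets) instead of up to three
-- sequential comprehensions; equivalence of the return values is proved below.

-- dict lookup on the association-list representation: first match (shared vocabulary of both ports)
def pvDictGetD (src : List (String × String)) (k dflt : String) : String :=
  (src.lookup k).getD dflt

-- Python truthiness of the Optional[str] dmso_plate
def pvTruthy (dmso_plate : Option String) : Bool :=
  match dmso_plate with
  | some p => p ≠ ""
  | none => false

-- src.get('compound_id', '').upper() == 'DMSO'
def pvCidIsDMSO (src : List (String × String)) : Bool :=
  PySem.Str.upper (pvDictGetD src "compound_id" "") == "DMSO"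

-- 'DMSO' in str(src.get('batch_id', '')).upper()
def pvBatchHasDMSO (src : List (String × String)) : Bool :=
  PySem.Str.isIn "DMSO" (PySem.Str.upper (pvDictGetD src "batch_id" ""))

-- src['source_plate'] == dmso_plate  (the key is present under Pre_; total form via getD "")
def pvPlateEq (src : List (String × String)) (dmso_plate : Option String) : Bool :=
  some (pvDictGetD src "source_plate" "") == dmso_plate

-- ===== PORT A =====
def collect_dmso_sources_py (source_data : List (List (String × String))) (dmso_plate : Option String) : List (List (String × String)) :=
  -- dmso_sources = []; if dmso_plate: first comprehension
  let dmso_sources : List (List (String × String)) :=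
    if pvTruthy dmso_plate then
      source_data.filter (fun src => pvPlateEq src dmso_plate && pvCidIsDMSO src)
    else []
  -- if not dmso_sources: second comprehension
  let dmso_sources :=
    if dmso_sources.isEmpty then source_data.filter (fun src => pvCidIsDMSO src)
    else dmso_sources
  -- if not dmso_sources: third comprehension
  let dmso_sources :=
    if dmso_sources.isEmpty then source_data.filter (fun src => pvBatchHasDMSO src)
    else dmso_sources
  dmso_sources

-- ===== PORT B =====
-- one pass: append each src to the buckets whose condition holds
def pvBuckets (source_data : List (List (String × String))) (dmso_plate : Option String) :
    List (List (String × String)) × List (List (String × String)) × List (List (String × String)) :=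
  source_data.foldl
    (fun acc src =>
      let acc1 := if pvTruthy dmso_plate && pvPlateEq src dmso_plate && pvCidIsDMSO src
                  then acc.1 ++ [src] else acc.1
      let acc2 := if pvCidIsDMSO src then acc.2.1 ++ [src] else acc.2.1
      let acc3 := if pvBatchHasDMSO src then acc.2.2 ++ [src] else acc.2.2
      (acc1, acc2, acc3))
    ([], [], [])

def collect_dmso_sources_py_alt (source_data : List (List (String × String))) (dmso_plate : Option String) : List (List (String × String)) :=
  let b := pvBuckets source_data dmso_plate
  -- by_plate or by_compound or by_batch
  if !b.1.isEmpty then b.1 else if !b.2.1.isEmpty then b.2.1 else b.2.2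

-- ===== PRECONDITION & SPEC =====
-- Pre_ excludes exactly the inputs where Python A raises KeyError: a truthy dmso_plate
-- together with some src lacking the 'source_plate' key.
def Pre_collect_dmso_sources_py (source_data : List (List (String × String))) (dmso_plate : Option String) : Prop :=
  pvTruthy dmso_plate = true → ∀ src ∈ source_data, (src.lookup "source_plate").isSome
instance (source_data : List (List (String × String))) (dmso_plate : Option String) : Decidable (Pre_collect_dmso_sources_py source_data dmso_plate) := by unfold Pre_collect_dmso_sources_py; infer_instance

def pvWitness_collect_dmso_sources_py : (List (List (String × String))) × Option String :=
  ([[("source_plate", "P1"), ("compound_id", "dmso")], [("source_plate", "P2"), ("batch_id", "xDMSO1")]], some "P1")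

def Spec_collect_dmso_sources_py (source_data : List (List (String × String))) (dmso_plate : Option String) (out : List (List (String × String))) : Prop := out = collect_dmso_sources_py_alt source_data dmso_plate
instance (source_data : List (List (String × String))) (dmso_plate : Option String) (out : List (List (String × String))) : Decidable (Spec_collect_dmso_sources_py source_data dmso_plate out) := by unfold Spec_collect_dmso_sources_py; infer_instance

-- ===== CLAIM (what is proved, stated in full; the proofs are below) =====
def Claim_equal_collect_dmso_sources_py : Prop := ∀ (source_data : List (List (String × String))) (dmso_plate : Option String), Dom_collect_dmso_sources_py source_data dmso_plate → Pre_collect_dmso_sources_py source_data dmso_plate → Spec_collect_dmso_sources_py source_data dmso_plate (collect_dmso_sources_py source_data dmso_plate)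

-- ===== LEMMAS AND PROOFS =====

-- the one-pass fold computes the three filters (appended behind any prior accumulator)
theorem pvBuckets_eq (source_data : List (List (String × String))) (dmso_plate : Option String) :
    pvBuckets source_data dmso_plate =
      (source_data.filter (fun src => pvTruthy dmso_plate && pvPlateEq src dmso_plate && pvCidIsDMSO src),
       source_data.filter (fun src => pvCidIsDMSO src),
       source_data.filter (fun src => pvBatchHasDMSO src)) := by
  unfold pvBuckets
  suffices h : ∀ (l : List (List (String × String))) (a b c : List (List (String × String))),
      l.foldl
        (fun acc src =>
          let acc1 := if pvTruthy dmso_plate && pvPlateEq src dmso_plate && pvCidIsDMSO src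
                      then acc.1 ++ [src] else acc.1
          let acc2 := if pvCidIsDMSO src then acc.2.1 ++ [src] else acc.2.1
          let acc3 := if pvBatchHasDMSO src then acc.2.2 ++ [src] else acc.2.2
          (acc1, acc2, acc3)) (a, b, c) =
      (a ++ l.filter (fun src => pvTruthy dmso_plate && pvPlateEq src dmso_plate && pvCidIsDMSO src),
       b ++ l.filter (fun src => pvCidIsDMSO src),
       c ++ l.filter (fun src => pvBatchHasDMSO src)) by
    simpa using h source_data [] [] []
  intro l
  induction l with
  | nil => intro a b c; simp
  | cons x xs ih =>
    intro a b c
    simp only [List.foldl_cons, List.filter_cons]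
    rw [ih]
    cases h1 : (pvTruthy dmso_plate && pvPlateEq x dmso_plate && pvCidIsDMSO x) <;>
      cases h2 : pvCidIsDMSO x <;>
      cases h3 : pvBatchHasDMSO x <;>
      simp_all

theorem collect_dmso_sources_py_spec : Claim_equal_collect_dmso_sources_py := by
  intro source_data dmso_plate _hdom _hpre
  unfold Spec_collect_dmso_sources_py collect_dmso_sources_py collect_dmso_sources_py_alt
  rw [pvBuckets_eq]
  by_cases ht : pvTruthy dmso_plate = true
  · have hf : source_data.filter (fun src => pvTruthy dmso_plate && pvPlateEq src dmso_plate && pvCidIsDMSO src)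
        = source_data.filter (fun src => pvPlateEq src dmso_plate && pvCidIsDMSO src) := by
      apply List.filter_congr
      intro src _
      simp [ht]
    rw [hf]
    simp only [ht, if_true]
    by_cases h1 : (source_data.filter (fun src => pvPlateEq src dmso_plate && pvCidIsDMSO src)).isEmpty <;>
      by_cases h2 : (source_data.filter (fun src => pvCidIsDMSO src)).isEmpty <;>
      simp [h1, h2]
  · have hf : source_data.filter (fun src => pvTruthy dmso_plate && pvPlateEq src dmso_plate && pvCidIsDMSO src)
        = [] := by
      apply List.filter_eq_nil_iff.mpr
      intro src _
      simp [ht]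
    simp only [eq_false_of_ne_true ht] at *
    rw [hf]
    by_cases h2 : (source_data.filter (fun src => pvCidIsDMSO src)).isEmpty <;> simp [h2]
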